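-- pv_equiv track=rewrite | github.com/SamruddiTribhan/XSS | AI/Ass7.py | plan_blocks
-- ===== SOURCE A (Python) =====
-- from collections import deque
--
-- def get_actions(x, y=None):
--     """Generate all possible actions for blocks."""
--     if y:
--         return [
--             (f"STACK({x},{y})",
--              {f"HOLDING({x})", f"CLEAR({y})"},
--              {f"ON({x},{y})", f"CLEAR({x})", "ARMEMPTY"},
--              {f"HOLDING({x})", f"CLEAR({y})"}),
--
--             (f"UNSTACK({x},{y})",
--              {f"ON({x},{y})", f"CLEAR({x})", "ARMEMPTY"},
--              {f"HOLDING({x})", f"CLEAR({y})"},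
--              {f"ON({x},{y})", "ARMEMPTY", f"CLEAR({x})"}),
--         ]
--     else:
--         return [
--             (f"PICKUP({x})",
--              {f"ONTABLE({x})", f"CLEAR({x})", "ARMEMPTY"},
--              {f"HOLDING({x})"},
--              {f"ONTABLE({x})", "ARMEMPTY", f"CLEAR({x})"}),
--
--             (f"PUTDOWN({x})",
--              {f"HOLDING({x})"},
--              {f"ONTABLE({x})", f"CLEAR({x})", "ARMEMPTY"},
--              {f"HOLDING({x})"}),
--         ]
--
-- def plan_blocks(start, goal, blocks=['A', 'B', 'C']):
--     """Simple BFS planner for block world."""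
--     queue = deque([(frozenset(start), [])])
--     visited = {frozenset(start)}
--
--     while queue:
--         state, path = queue.popleft()
--
--         # Goal check
--         if goal.issubset(state):
--             return path
--
--         # Try all actions
--         for b1 in blocks:
--             # Single block actions (PICKUP, PUTDOWN)
--             for action_name, pre, add, delete in get_actions(b1):
--                 if pre.issubset(state):
--                     new_state = (state - delete) | add
--                     if new_state not in visited:
--                         visited.add(new_state)
--                         queue.append((new_state, path + [action_name]))
--
--             # Two block actions (STACK, UNSTACK)
--             for b2 in blocks:
--                 if b1 != b2:
--                     for action_name, pre, add, delete in get_actions(b1, b2):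
--                         if pre.issubset(state):
--                             new_state = (state - delete) | add
--                             if new_state not in visited:
--                                 visited.add(new_state)
--                                 queue.append((new_state, path + [action_name]))
--
--     return None
-- ===== SOURCE B (Python) =====
-- from collections import deque
--
-- def get_actions(x, y=None):
--     """Generate all possible actions for blocks."""
--     if y:
--         return [
--             (f"STACK({x},{y})",
--              {f"HOLDING({x})", f"CLEAR({y})"},
--              {f"ON({x},{y})", f"CLEAR({x})", "ARMEMPTY"},
--              {f"HOLDING({x})", f"CLEAR({y})"}),
--             (f"UNSTACK({x},{y})",
--              {f"ON({x},{y})", f"CLEAR({x})", "ARMEMPTY"},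
--              {f"HOLDING({x})", f"CLEAR({y})"},
--              {f"ON({x},{y})", "ARMEMPTY", f"CLEAR({x})"}),
--         ]
--     else:
--         return [
--             (f"PICKUP({x})",
--              {f"ONTABLE({x})", f"CLEAR({x})", "ARMEMPTY"},
--              {f"HOLDING({x})"},
--              {f"ONTABLE({x})", "ARMEMPTY", f"CLEAR({x})"}),
--             (f"PUTDOWN({x})",
--              {f"HOLDING({x})"},
--              {f"ONTABLE({x})", f"CLEAR({x})", "ARMEMPTY"},
--              {f"HOLDING({x})"}),
--         ]
--
-- def plan_blocks(start, goal, blocks=['A', 'B', 'C']):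
--     """BFS planner that stores parent pointers instead of per-node paths."""
--     s0 = frozenset(start)
--     queue = deque([s0])
--     visited = {s0}
--     parent = {}  # state -> (predecessor state, action name)
--     while queue:
--         state = queue.popleft()
--         if goal.issubset(state):
--             steps = []
--             cur = state
--             while cur in parent:
--                 cur, act = parent[cur]
--                 steps.append(act)
--             steps.reverse()
--             return steps
--         for b1 in blocks:
--             for name, pre, add, delete in get_actions(b1):
--                 if pre.issubset(state):
--                     ns = (state - delete) | add
--                     if ns not in visited:
--                         visited.add(ns)
--                         parent[ns] = (state, name)
--                         queue.append(ns)
--             for b2 in blocks: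
--                 if b1 != b2:
--                     for name, pre, add, delete in get_actions(b1, b2):
--                         if pre.issubset(state):
--                             ns = (state - delete) | add
--                             if ns not in visited:
--                                 visited.add(ns)
--                                 parent[ns] = (state, name)
--                                 queue.append(ns)
--     return None
-- ===== Notes on version B (the rewrite author's own statement) =====
-- stated objective: alternative
-- what changed: Same BFS over block-world states, but queue entries are bare states with a parent-pointer dict (state -> (predecessor, action)) set on first discovery, and the action sequence is reconstructed by walking parents back from the goal state and reversing, instead of copying a growing path list into every queue entry.
import Mathlib
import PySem

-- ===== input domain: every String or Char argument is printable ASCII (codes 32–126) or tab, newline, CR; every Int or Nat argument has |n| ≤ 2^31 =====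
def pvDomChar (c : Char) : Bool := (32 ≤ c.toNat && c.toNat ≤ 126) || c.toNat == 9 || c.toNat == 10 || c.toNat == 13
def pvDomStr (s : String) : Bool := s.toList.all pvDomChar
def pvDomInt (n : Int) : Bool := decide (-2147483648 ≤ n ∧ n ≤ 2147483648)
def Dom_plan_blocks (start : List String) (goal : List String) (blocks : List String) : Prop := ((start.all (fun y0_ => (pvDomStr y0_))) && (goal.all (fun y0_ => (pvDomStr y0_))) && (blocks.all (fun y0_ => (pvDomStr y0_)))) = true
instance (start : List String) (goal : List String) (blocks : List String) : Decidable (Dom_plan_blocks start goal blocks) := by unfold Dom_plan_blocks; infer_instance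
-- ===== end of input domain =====

-- B replaces A's per-queue-entry path lists by a parent-pointer map with path reconstruction at
-- the goal state (objective: alternative decomposition, same BFS order and results).

-- ===== PORT A =====
-- Shared representation of Python (frozen)sets of strings: canonical sorted duplicate-free list,
-- so frozenset equality / `not in visited` is list equality (exact: all produced state sets are
-- canonicalised, and every set operation A performs is order-independent).
def canonSt (l : List String) : List String := l.dedup.mergeSort (fun a b => decide (a ≤ b))

-- g.issubset(s)
def subsetL (g s : List String) : Bool := g.all (fun x => s.contains x)

-- (state - delete) | add, re-canonicalised
def applyAct (st add del : List String) : List String :=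
  canonSt ((st.filter (fun f => !(del.contains f))) ++ add)

def pyActions1 (x : String) : List (String × List String × List String × List String) :=
  [ ("PICKUP(" ++ x ++ ")",
     ["ONTABLE(" ++ x ++ ")", "CLEAR(" ++ x ++ ")", "ARMEMPTY"],
     ["HOLDING(" ++ x ++ ")"],
     ["ONTABLE(" ++ x ++ ")", "ARMEMPTY", "CLEAR(" ++ x ++ ")"]),
    ("PUTDOWN(" ++ x ++ ")",
     ["HOLDING(" ++ x ++ ")"],
     ["ONTABLE(" ++ x ++ ")", "CLEAR(" ++ x ++ ")", "ARMEMPTY"],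
     ["HOLDING(" ++ x ++ ")"]) ]

-- get_actions(x, y=None); Python's `if y:` is falsy for y=None AND y="".
def get_actions (x : String) (y : Option String) : List (String × List String × List String × List String) :=
  match y with
  | none => pyActions1 x
  | some yy =>
    if yy = "" then pyActions1 x
    else
      [ ("STACK(" ++ x ++ "," ++ yy ++ ")",
         ["HOLDING(" ++ x ++ ")", "CLEAR(" ++ yy ++ ")"],
         ["ON(" ++ x ++ "," ++ yy ++ ")", "CLEAR(" ++ x ++ ")", "ARMEMPTY"],
         ["HOLDING(" ++ x ++ ")", "CLEAR(" ++ yy ++ ")"]),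
        ("UNSTACK(" ++ x ++ "," ++ yy ++ ")",
         ["ON(" ++ x ++ "," ++ yy ++ ")", "CLEAR(" ++ x ++ ")", "ARMEMPTY"],
         ["HOLDING(" ++ x ++ ")", "CLEAR(" ++ yy ++ ")"],
         ["ON(" ++ x ++ "," ++ yy ++ ")", "ARMEMPTY", "CLEAR(" ++ x ++ ")"]) ]

-- one candidate action applied to the popped (state, path), threading (queue, visited)
def stepA (st path : List String)
    (acc : List (List String × List String) × List (List String))
    (act : String × List String × List String × List String) :
    List (List String × List String) × List (List String) :=
  if subsetL act.2.1 st then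
    let ns := applyAct st act.2.2.1 act.2.2.2
    if acc.2.contains ns then acc
    else (acc.1 ++ [(ns, path ++ [act.1])], ns :: acc.2)
  else acc

-- the `for b1 in blocks: … for b2 in blocks: if b1 != b2: …` loops
def expandA (blocks : List String) (st path : List String)
    (acc : List (List String × List String) × List (List String)) :
    List (List String × List String) × List (List String) :=
  blocks.foldl (fun acc1 b1 =>
    blocks.foldl (fun acc2 b2 =>
      if b1 ≠ b2 then (get_actions b1 (some b2)).foldl (stepA st path) acc2 else acc2)
      ((get_actions b1 none).foldl (stepA st path) acc1)) acc

-- the `while queue:` loop; fuel only makes it total (it counts pops, bounded by pvFuel below)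
def bfsA (goal blocks : List String) :
    Nat → List (List String × List String) → List (List String) → Option (List String)
  | 0, _, _ => none
  | _ + 1, [], _ => none
  | f + 1, sp :: qs, vis =>
    if subsetL goal sp.1 then some sp.2
    else
      let acc := expandA blocks sp.1 sp.2 (qs, vis)
      bfsA goal blocks f acc.1 acc.2

-- pops ≤ enqueues ≤ #distinct states ≤ 2^(#fluents ever mentioned); +1 so fuel never runs out
def pvFuel (start blocks : List String) : Nat :=
  2 ^ (start.length + 3 * blocks.length + blocks.length * blocks.length + 1) + 1

def plan_blocks (start : List String) (goal : List String) (blocks : List String) :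
    Option (List String) :=
  bfsA goal blocks (pvFuel start blocks) [(canonSt start, [])] [canonSt start]

-- ===== PORT B =====
-- parent dict: association list state -> (predecessor state, action name); keys are only ever
-- fresh, so plain append = Python dict insertion.
def lookupPar (par : List (List String × (List String × String))) (k : List String) :
    Option (List String × String) :=
  (par.find? (fun e => e.1 == k)).map (fun e => e.2)

-- `while cur in parent: cur, act = parent[cur]; steps.append(act)`; fuel = |parent| suffices
def walkB : Nat → List (List String × (List String × String)) → List String → List String →
    List String
  | 0, _, _, steps => steps
  | f + 1, par, cur, steps =>
    match lookupPar par cur with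
    | none => steps
    | some pn => walkB f par pn.1 (steps ++ [pn.2])

def stepB (st : List String)
    (acc : List (List String) × List (List String) × List (List String × (List String × String)))
    (act : String × List String × List String × List String) :
    List (List String) × List (List String) × List (List String × (List String × String)) :=
  if subsetL act.2.1 st then
    let ns := applyAct st act.2.2.1 act.2.2.2
    if acc.2.1.contains ns then acc
    else (acc.1 ++ [ns], ns :: acc.2.1, acc.2.2 ++ [(ns, (st, act.1))])
  else acc

def expandB (blocks : List String) (st : List String)
    (acc : List (List String) × List (List String) × List (List String × (List String × String))) :
    List (List String) × List (List String) × List (List String × (List String × String)) :=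
  blocks.foldl (fun acc1 b1 =>
    blocks.foldl (fun acc2 b2 =>
      if b1 ≠ b2 then (get_actions b1 (some b2)).foldl (stepB st) acc2 else acc2)
      ((get_actions b1 none).foldl (stepB st) acc1)) acc

def bfsB (goal blocks : List String) :
    Nat → List (List String) → List (List String) →
    List (List String × (List String × String)) → Option (List String)
  | 0, _, _, _ => none
  | _ + 1, [], _, _ => none
  | f + 1, st :: qs, vis, par =>
    if subsetL goal st then some ((walkB par.length par st []).reverse)
    else
      let acc := expandB blocks st (qs, vis, par)
      bfsB goal blocks f acc.1 acc.2.1 acc.2.2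

def plan_blocks_alt (start : List String) (goal : List String) (blocks : List String) :
    Option (List String) :=
  bfsB goal blocks (pvFuel start blocks) [canonSt start] [canonSt start] []

-- ===== PRECONDITION & SPEC =====
def Spec_plan_blocks (start : List String) (goal : List String) (blocks : List String) (out : Option (List String)) : Prop := out = plan_blocks_alt start goal blocks
instance (start : List String) (goal : List String) (blocks : List String) (out : Option (List String)) : Decidable (Spec_plan_blocks start goal blocks out) := by unfold Spec_plan_blocks; infer_instance

-- ===== CLAIM (what is proved, stated in full; the proofs are below) =====
def Claim_equal_plan_blocks : Prop := ∀ (start : List String) (goal : List String) (blocks : List String), Dom_plan_blocks start goal blocks → Spec_plan_blocks start goal blocks (plan_blocks start goal blocks)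

-- ===== LEMMAS AND PROOFS =====

-- Ch vis par n st p: walking parent pointers from st yields the action list p (chain height n),
-- and every state on the chain is in vis.
inductive Ch (vis : List (List String)) (par : List (List String × (List String × String))) :
    Nat → List String → List String → Prop where
  | nil : ∀ st, st ∈ vis → lookupPar par st = none → Ch vis par 0 st []
  | cons : ∀ st pn p n, st ∈ vis → lookupPar par st = some pn → Ch vis par n pn.1 p →
      Ch vis par (n + 1) st (p ++ [pn.2])

theorem walk_eq {vis par n st p} (h : Ch vis par n st p) :
    ∀ f steps, n ≤ f → walkB f par st steps = steps ++ p.reverse := by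
  induction h with
  | nil st hm hl =>
    intro f steps _
    cases f with
    | zero => simp [walkB]
    | succ f => simp [walkB, hl]
  | cons st pn p n hm hl _ ih =>
    intro f steps hf
    cases f with
    | zero => omega
    | succ f =>
      simp only [walkB, hl]
      rw [ih f (steps ++ [pn.2]) (by omega)]
      simp

theorem ch_mono {vis vis' par par' n st p} (h : Ch vis par n st p)
    (hv : ∀ x ∈ vis, x ∈ vis')
    (hp : ∀ k ∈ vis, lookupPar par' k = lookupPar par k) :
    Ch vis' par' n st p := by
  induction h with
  | nil st hm hl => exact Ch.nil st (hv _ hm) ((hp _ hm).trans hl)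
  | cons st pn p n hm hl _ ih => exact Ch.cons st pn p n (hv _ hm) ((hp _ hm).trans hl) ih

theorem lookupPar_append_of_ne {par : List (List String × (List String × String))}
    {k ns : List String} {w : List String × String} (h : k ≠ ns) :
    lookupPar (par ++ [(ns, w)]) k = lookupPar par k := by
  simp only [lookupPar, List.find?_append]
  cases hf : par.find? (fun e => e.1 == k) with
  | some e => simp
  | none =>
    simp only [Option.none_or]
    have : ((ns, w).1 == k) = false := by simp [Ne.symm h]
    simp [List.find?, this]

theorem lookupPar_keys_mem {par : List (List String × (List String × String))} {k : List String}
    {v : List String × String} (h : lookupPar par k = some v) :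
    ∃ e ∈ par, e.1 = k := by
  simp only [lookupPar, Option.map_eq_some_iff] at h
  obtain ⟨e, he, _⟩ := h
  exact ⟨e, List.mem_of_find?_eq_some he, by simpa using List.find?_some he⟩

theorem lookupPar_append_self {par : List (List String × (List String × String))}
    {ns : List String} {w : List String × String} (h : lookupPar par ns = none) :
    lookupPar (par ++ [(ns, w)]) ns = some w := by
  simp only [lookupPar, Option.map_eq_none_iff] at h
  simp [lookupPar, List.find?_append, h]

-- the simulation relation between A's fold state and B's fold state, for popped (st, p)
def RelP (st p : List String)
    (a : List (List String × List String) × List (List String))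
    (b : List (List String) × List (List String) × List (List String × (List String × String))) :
    Prop :=
  b.2.1 = a.2 ∧ b.1 = a.1.map Prod.fst ∧
  (∀ sp ∈ a.1, ∃ n, n ≤ b.2.2.length ∧ Ch a.2 b.2.2 n sp.1 sp.2) ∧
  (∀ e ∈ b.2.2, e.1 ∈ a.2) ∧
  (∃ n, n ≤ b.2.2.length ∧ Ch a.2 b.2.2 n st p)

theorem step_rel {st p a b act} (hr : RelP st p a b) :
    RelP st p (stepA st p a act) (stepB st b act) := by
  obtain ⟨hv, hq, hchains, hkeys, hst⟩ := hr
  unfold stepA stepB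
  by_cases hpre : subsetL act.2.1 st
  · simp only [hpre, if_true]
    set ns := applyAct st act.2.2.1 act.2.2.2 with hns
    rw [hv]
    by_cases hmem : a.2.contains ns
    · simp only [hmem, if_true]; exact ⟨hv, hq, hchains, hkeys, hst⟩
    · simp only [hmem, if_false, Bool.false_eq_true]
      have hnsvis : ns ∉ a.2 := by simpa using hmem
      have hfresh : lookupPar b.2.2 ns = none := by
        cases hl : lookupPar b.2.2 ns with
        | none => rfl
        | some v =>
          obtain ⟨e, he, hek⟩ := lookupPar_keys_mem hl
          exact absurd (hek ▸ hkeys e he) hnsvis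
      have hpres : ∀ k ∈ a.2,
          lookupPar (b.2.2 ++ [(ns, (st, act.1))]) k = lookupPar b.2.2 k := by
        intro k hk
        exact lookupPar_append_of_ne (fun h => hnsvis (h ▸ hk))
      have hsub : ∀ x ∈ a.2, x ∈ ns :: a.2 := fun x hx => List.mem_cons_of_mem _ hx
      refine ⟨rfl, ?_, ?_, ?_, ?_⟩
      · simp [hq]
      · intro sp hsp
        rcases List.mem_append.1 hsp with hsp | hsp
        · obtain ⟨n, hn, hc⟩ := hchains sp hsp
          exact ⟨n, by simp; omega, ch_mono hc hsub hpres⟩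
        · simp at hsp
          obtain ⟨n, hn, hc⟩ := hst
          refine ⟨n + 1, by simp; omega, ?_⟩
          have hc' : Ch (ns :: a.2) (b.2.2 ++ [(ns, (st, act.1))]) n st p :=
            ch_mono hc hsub hpres
          have := Ch.cons (vis := ns :: a.2) (par := b.2.2 ++ [(ns, (st, act.1))])
            ns (st, act.1) p n (List.mem_cons_self) (lookupPar_append_self hfresh) hc'
          rw [hsp]
          exact this
      · intro e he
        rcases List.mem_append.1 he with he | he
        · exact List.mem_cons_of_mem _ (hkeys e he)
        · simp at he; rw [he]; exact List.mem_cons_self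
      · obtain ⟨n, hn, hc⟩ := hst
        exact ⟨n, by simp; omega, ch_mono hc hsub hpres⟩
  · simp only [hpre]
    simp only [Bool.false_eq_true, if_false]
    exact ⟨hv, hq, hchains, hkeys, hst⟩

theorem foldl_pres {α A B : Type} (R : A → B → Prop) (fA : A → α → A) (fB : B → α → B)
    (h : ∀ a b x, R a b → R (fA a x) (fB b x)) :
    ∀ (l : List α) (a : A) (b : B), R a b → R (l.foldl fA a) (l.foldl fB b) := by
  intro l
  induction l with
  | nil => intro a b hr; exact hr
  | cons x xs ih => intro a b hr; exact ih _ _ (h a b x hr)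

theorem expand_rel {st p : List String} (blocks : List String) {a b} (hr : RelP st p a b) :
    RelP st p (expandA blocks st p a) (expandB blocks st b) := by
  unfold expandA expandB
  refine foldl_pres (RelP st p) _ _ ?_ blocks a b hr
  intro a1 b1 x h1
  refine foldl_pres (RelP st p) _ _ ?_ blocks _ _
    (foldl_pres (RelP st p) (stepA st p) (stepB st) (fun _ _ _ h => step_rel h)
      (get_actions x none) a1 b1 h1)
  intro a2 b2 y h2
  by_cases hxy : x ≠ y
  · rw [if_pos hxy, if_pos hxy]
    exact foldl_pres (RelP st p) (stepA st p) (stepB st) (fun _ _ _ h => step_rel h)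
      (get_actions x (some y)) a2 b2 h2
  · rw [if_neg hxy, if_neg hxy]
    exact h2

theorem sim (goal blocks : List String) :
    ∀ (f : Nat) (qA : List (List String × List String)) (qB : List (List String))
      (vis : List (List String)) (par : List (List String × (List String × String))),
      qB = qA.map Prod.fst →
      (∀ sp ∈ qA, ∃ n, n ≤ par.length ∧ Ch vis par n sp.1 sp.2) →
      (∀ e ∈ par, e.1 ∈ vis) →
      bfsA goal blocks f qA vis = bfsB goal blocks f qB vis par := by
  intro f
  induction f with
  | zero => intro qA qB vis par _ _ _; rfl
  | succ f ih =>
    intro qA qB vis par hqB hch hkeys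
    cases qA with
    | nil => subst hqB; rfl
    | cons sp qs =>
      subst hqB
      simp only [List.map_cons, bfsA, bfsB]
      by_cases hgoal : subsetL goal sp.1
      · simp only [hgoal, if_true]
        obtain ⟨n, hn, hc⟩ := hch sp List.mem_cons_self
        rw [walk_eq hc par.length [] hn]
        simp
      · simp only [hgoal]
        have hrel : RelP sp.1 sp.2 (qs, vis) (qs.map Prod.fst, vis, par) := by
          refine ⟨rfl, rfl, ?_, hkeys, ?_⟩
          · exact fun x hx => hch x (List.mem_cons_of_mem _ hx)
          · exact hch sp List.mem_cons_self
        have := expand_rel blocks hrel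
        obtain ⟨hv, hq, hchains', hkeys', _⟩ := this
        rw [← hv]
        exact ih _ _ _ _ hq
          (by rw [hv]; exact hchains') (by rw [hv]; exact hkeys')

-- ===== VERDICT (by name: the statement is the Claim_ definition above) =====
theorem plan_blocks_spec : Claim_equal_plan_blocks := by
  intro start goal blocks _
  unfold Spec_plan_blocks plan_blocks plan_blocks_alt
  refine sim goal blocks (pvFuel start blocks) [(canonSt start, [])] [canonSt start]
    [canonSt start] [] rfl ?_ (by simp)
  intro sp hsp
  simp at hsp
  subst hsp
  exact ⟨0, by simp, Ch.nil _ (by simp) rfl⟩
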